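-- pv_equiv track=rewrite | github.com/nreddy83/AI21-22 | Gridworld.py | g0shortestPath
-- ===== SOURCE A (Python) =====
-- def g0shortestPath(start, currentNbrs, maxReward, rewards, idx):
--     while idx < len(maxReward):
--         maxRewards = maxReward[idx]
--         parseMe = [start]
--         dctSeen = {start: None}
--         moves = []
--         while parseMe:
--             node = parseMe[0]
--             for nbr in currentNbrs[node]:
--                 if nbr not in dctSeen:
--                     if rewards[nbr] != 0 and nbr not in maxRewards: continue
--                     if nbr in maxRewards:
--                         moves = [start, nbr]
--                         while node != start:
--                             moves.insert(1, node)
--                             node = dctSeen[node]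
--                         return maxRewards, len(moves) - 1
--                     parseMe.append(nbr)
--                     dctSeen[nbr] = node
--             parseMe.remove(node)
--         idx += 1
--     return [], -1
-- ===== SOURCE B (Python) =====
-- def g0shortestPath(start, currentNbrs, maxReward, rewards, idx):
--     # Level-synchronous BFS: expand whole frontiers with a seen-set and a level
--     # counter d, so neither parent pointers nor path reconstruction are needed.
--     for i in range(idx, len(maxReward)):
--         targets = maxReward[i]
--         seen = {start}
--         frontier = [start]
--         d = 0
--         while frontier:
--             d += 1
--             nxt = []
--             for node in frontier:
--                 for nbr in currentNbrs[node]: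
--                     if nbr in seen:
--                         continue
--                     if nbr in targets:
--                         return targets, d
--                     if rewards[nbr] == 0:
--                         seen.add(nbr)
--                         nxt.append(nbr)
--             frontier = nxt
--     return [], -1
-- ===== Notes on version B (the rewrite author's own statement) =====
-- stated objective: simpler
-- what changed: Queue-plus-parent-pointer BFS with a moves-list backtracking reconstruction is replaced by a level-synchronous BFS: whole frontiers are expanded with a plain seen-set and a level counter d, so the answer is just (targets, d) and the parent dict and the whole path-reconstruction loop disappear.
-- outside the precondition, e.g. on g0shortestPath(0, {0: [1]}, [[1]], {0: 0, 1: 5}, 0): A returns ([1], 1), B returns ([1], 1)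
import Mathlib
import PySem

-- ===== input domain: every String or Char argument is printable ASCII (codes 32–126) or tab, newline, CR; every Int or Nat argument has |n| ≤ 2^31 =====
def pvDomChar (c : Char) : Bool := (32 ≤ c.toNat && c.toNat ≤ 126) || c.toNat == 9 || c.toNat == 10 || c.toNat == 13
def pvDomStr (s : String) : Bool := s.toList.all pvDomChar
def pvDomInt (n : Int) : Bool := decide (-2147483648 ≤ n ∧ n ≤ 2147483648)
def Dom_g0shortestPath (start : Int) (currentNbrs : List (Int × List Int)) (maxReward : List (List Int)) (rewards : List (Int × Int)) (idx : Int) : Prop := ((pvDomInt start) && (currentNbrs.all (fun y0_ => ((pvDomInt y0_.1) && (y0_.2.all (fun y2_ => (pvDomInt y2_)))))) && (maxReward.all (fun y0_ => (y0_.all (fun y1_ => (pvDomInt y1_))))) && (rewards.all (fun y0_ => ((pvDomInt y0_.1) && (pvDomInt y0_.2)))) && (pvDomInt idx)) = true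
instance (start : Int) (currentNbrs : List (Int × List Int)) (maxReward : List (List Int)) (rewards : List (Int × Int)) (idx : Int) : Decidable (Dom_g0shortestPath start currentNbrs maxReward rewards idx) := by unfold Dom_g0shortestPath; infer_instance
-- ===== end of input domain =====

-- B replaces A's queue-plus-parent-pointer BFS and its path-reconstruction loop by a
-- level-synchronous BFS: whole frontiers are expanded with a seen-set and a level counter,
-- so the answer is the counter and no parent dict or backtracking exists (objective: simpler).
-- Both while-loops are ported with a generous fuel argument that only makes them total;
-- under Pre_ the fuel provably never runs out.

-- All listed neighbour entries; its length bounds the BFS queue traffic, used as fuel.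
def pvAllNbrs (currentNbrs : List (Int × List Int)) : List Int :=
  currentNbrs.flatMap (fun p => p.2)

def pvNbrCount (currentNbrs : List (Int × List Int)) : Nat :=
  (pvAllNbrs currentNbrs).length

-- ===== PORT A =====

-- A's 'while node != start: moves.insert(1, node); node = dctSeen[node]' loop, fuel-bounded
-- (a missing key or a None parent would be a KeyError / None-step in Python — unreachable
-- under Pre_; there the loop just returns the moves built so far)
def pvA_backtrack (start : Int) (dct : PySem.Dict Int (Option Int)) :
    Nat → Int → List Int → List Int
  | 0, _, moves => moves
  | f + 1, node, moves =>
    if node = start then moves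
    else
      match dct.get? node with
      | some (some p) => pvA_backtrack start dct f p (PySem.List.insert moves 1 node)
      | _ => PySem.List.insert moves 1 node

-- A's 'for nbr in currentNbrs[node]' body: early return (inl) or updated (parseMe, dctSeen)
def pvA_scan (start : Int) (rewards : List (Int × Int)) (maxRewards : List Int) (node : Int) :
    List Int → List Int → PySem.Dict Int (Option Int) →
    (List Int × Int) ⊕ (List Int × PySem.Dict Int (Option Int))
  | [], parseMe, dct => Sum.inr (parseMe, dct)
  | nbr :: rest, parseMe, dct =>
    if dct.contains nbr then pvA_scan start rewards maxRewards node rest parseMe dct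
    else if (List.lookup nbr rewards).getD 0 ≠ 0 ∧ nbr ∉ maxRewards then
      -- rewards[nbr]: a missing key is a KeyError in Python, excluded by Pre_
      pvA_scan start rewards maxRewards node rest parseMe dct
    else if nbr ∈ maxRewards then
      let moves := pvA_backtrack start dct dct.size node [start, nbr]
      Sum.inl (maxRewards, (moves.length : Int) - 1)
    else
      pvA_scan start rewards maxRewards node rest (parseMe ++ [nbr]) (dct.insert nbr (some node))

-- A's 'while parseMe' loop; none = queue exhausted (fall through to idx += 1)
def pvA_bfs (start : Int) (currentNbrs : List (Int × List Int)) (rewards : List (Int × Int))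
    (maxRewards : List Int) :
    Nat → List Int → PySem.Dict Int (Option Int) → Option (List Int × Int)
  | 0, _, _ => none
  | f + 1, parseMe, dct =>
    match PySem.List.pyGet? parseMe 0 with
    | none => none     -- parseMe empty: the while loop exits
    | some node =>
      -- currentNbrs[node]: a missing key is a KeyError in Python, excluded by Pre_
      match pvA_scan start rewards maxRewards node ((List.lookup node currentNbrs).getD []) parseMe dct with
      | Sum.inl res => some res
      | Sum.inr (parseMe', dct') =>
        pvA_bfs start currentNbrs rewards maxRewards f
          ((PySem.List.remove? parseMe' node).getD parseMe') dct'

-- A's 'while idx < len(maxReward)' loop, fuel-bounded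
def pvA_outer (start : Int) (currentNbrs : List (Int × List Int)) (maxReward : List (List Int))
    (rewards : List (Int × Int)) : Nat → Int → List Int × Int
  | 0, _ => ([], -1)
  | f + 1, idx =>
    if idx < (maxReward.length : Int) then
      match PySem.List.pyGet? maxReward idx with
      | none => ([], -1)      -- IndexError (idx < -len(maxReward)), excluded by Pre_
      | some maxRewards =>
        match pvA_bfs start currentNbrs rewards maxRewards (pvNbrCount currentNbrs + 2)
            [start] (PySem.Dict.empty.insert start none) with
        | some res => res
        | none => pvA_outer start currentNbrs maxReward rewards f (idx + 1)
    else ([], -1)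

def g0shortestPath (start : Int) (currentNbrs : List (Int × List Int)) (maxReward : List (List Int)) (rewards : List (Int × Int)) (idx : Int) : List Int × Int :=
  pvA_outer start currentNbrs maxReward rewards (2 * maxReward.length + 1) idx

-- ===== PORT B =====

-- B's innermost 'for nbr in currentNbrs[node]' loop over one node's neighbours:
-- none = a target was reached (return targets, d); some = updated (nxt, seen)
def pvB_scanNbrs (rewards : List (Int × Int)) (targets : List Int) :
    List Int → List Int → PySem.Set Int → Option (List Int × PySem.Set Int)
  | [], nxt, seen => some (nxt, seen)
  | nbr :: rest, nxt, seen =>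
    if PySem.Set.contains seen nbr then pvB_scanNbrs rewards targets rest nxt seen
    else if nbr ∈ targets then none
    else if (List.lookup nbr rewards).getD 0 = 0 then
      -- rewards[nbr]: a missing key is a KeyError in Python, excluded by Pre_
      pvB_scanNbrs rewards targets rest (nxt ++ [nbr]) (PySem.Set.add seen nbr)
    else pvB_scanNbrs rewards targets rest nxt seen

-- B's 'for node in frontier' loop of one level
def pvB_level (currentNbrs : List (Int × List Int)) (rewards : List (Int × Int))
    (targets : List Int) :
    List Int → List Int → PySem.Set Int → Option (List Int × PySem.Set Int)
  | [], nxt, seen => some (nxt, seen)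
  | node :: rest, nxt, seen =>
    -- currentNbrs[node]: a missing key is a KeyError in Python, excluded by Pre_
    match pvB_scanNbrs rewards targets ((List.lookup node currentNbrs).getD []) nxt seen with
    | none => none
    | some (nxt', seen') => pvB_level currentNbrs rewards targets rest nxt' seen'

-- B's 'while frontier' loop, fuel-bounded; d is the level counter before 'd += 1'
def pvB_bfs (currentNbrs : List (Int × List Int)) (rewards : List (Int × Int))
    (targets : List Int) : Nat → List Int → PySem.Set Int → Int → Option Int
  | 0, _, _, _ => none
  | _ + 1, [], _, _ => none
  | f + 1, frontier, seen, d =>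
    match pvB_level currentNbrs rewards targets frontier [] seen with
    | none => some (d + 1)
    | some (nxt, seen') => pvB_bfs currentNbrs rewards targets f nxt seen' (d + 1)

-- B's 'for i in range(idx, len(maxReward))' loop: structural recursion on the range list
def pvB_outer (start : Int) (currentNbrs : List (Int × List Int)) (maxReward : List (List Int))
    (rewards : List (Int × Int)) : List Int → List Int × Int
  | [] => ([], -1)
  | i :: rest =>
    match PySem.List.pyGet? maxReward i with
    | none => ([], -1)        -- IndexError (i < -len(maxReward)), excluded by Pre_
    | some targets =>
      match pvB_bfs currentNbrs rewards targets (pvNbrCount currentNbrs + 2)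
          [start] (PySem.Set.ofList [start]) 0 with
      | some d => (targets, d)
      | none => pvB_outer start currentNbrs maxReward rewards rest

def g0shortestPath_alt (start : Int) (currentNbrs : List (Int × List Int)) (maxReward : List (List Int)) (rewards : List (Int × Int)) (idx : Int) : List Int × Int :=
  pvB_outer start currentNbrs maxReward rewards
    (PySem.List.pyRange idx (PySem.List.len maxReward) 1)

-- ===== PRECONDITION & SPEC =====
-- Pre_ excludes exactly the inputs on which the Python may raise: idx below -len(maxReward)
-- (IndexError) and, when the BFS actually runs (idx < len(maxReward)), dict arguments
-- missing a looked-up key (KeyError).  The key condition is the usual closed-form graph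
-- well-formedness over-approximation — start must be a key of currentNbrs and every listed
-- neighbour a key of both currentNbrs and rewards — so it also excludes some inputs on
-- which A happens to return before reaching the missing lookup (see the cite in the claim).
def Pre_g0shortestPath (start : Int) (currentNbrs : List (Int × List Int)) (maxReward : List (List Int)) (rewards : List (Int × Int)) (idx : Int) : Prop :=
  -(maxReward.length : Int) ≤ idx ∧
  ((maxReward.length : Int) ≤ idx ∨
    ((List.lookup start currentNbrs).isSome = true ∧
     ∀ p ∈ currentNbrs, ∀ n ∈ p.2,
       (List.lookup n currentNbrs).isSome = true ∧ (List.lookup n rewards).isSome = true))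
instance (start : Int) (currentNbrs : List (Int × List Int)) (maxReward : List (List Int)) (rewards : List (Int × Int)) (idx : Int) : Decidable (Pre_g0shortestPath start currentNbrs maxReward rewards idx) := by unfold Pre_g0shortestPath; infer_instance

def pvWitness_g0shortestPath : Int × (List (Int × List Int)) × List (List Int) × (List (Int × Int)) × Int :=
  (0, [(0, [1]), (1, [])], [[2], [1]], [(0, 0), (1, 0)], 0)

def Spec_g0shortestPath (start : Int) (currentNbrs : List (Int × List Int)) (maxReward : List (List Int)) (rewards : List (Int × Int)) (idx : Int) (out : List Int × Int) : Prop := out = g0shortestPath_alt start currentNbrs maxReward rewards idx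
instance (start : Int) (currentNbrs : List (Int × List Int)) (maxReward : List (List Int)) (rewards : List (Int × Int)) (idx : Int) (out : List Int × Int) : Decidable (Spec_g0shortestPath start currentNbrs maxReward rewards idx out) := by unfold Spec_g0shortestPath; infer_instance

-- ===== CLAIM (what is proved, stated in full; the proofs are below) =====
def Claim_equal_g0shortestPath : Prop := ∀ (start : Int) (currentNbrs : List (Int × List Int)) (maxReward : List (List Int)) (rewards : List (Int × Int)) (idx : Int), Dom_g0shortestPath start currentNbrs maxReward rewards idx → Pre_g0shortestPath start currentNbrs maxReward rewards idx → Spec_g0shortestPath start currentNbrs maxReward rewards idx (g0shortestPath start currentNbrs maxReward rewards idx)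

-- ===== LEMMAS AND PROOFS =====

-- Ghost invariant on A's parent-pointer dict: a ghost distance dict 'dist' has the same
-- keys in the same order, start at distance 0, and every other key's parent one level up.
-- B's seen-set is dist.keys itself, so the whole simulation is phrased over 'dist'.
structure pvInv (start : Int) (dct : PySem.Dict Int (Option Int)) (dist : PySem.Dict Int Int) : Prop where
  keys_eq : dct.keys = dist.keys
  nodup : dist.keys.Nodup
  start0 : dist.get? start = some 0
  vals : ∀ n d, dist.get? n = some d →
    0 ≤ d ∧ d < (dist.size : Int) ∧ (d = 0 → n = start) ∧
    (0 < d → ∃ p, dct.get? n = some (some p) ∧ dist.get? p = some (d - 1))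

-- A's dict and B's seen-set membership coincide.
theorem pv_contains_eq {start : Int} {dct : PySem.Dict Int (Option Int)}
    {dist : PySem.Dict Int Int} (inv : pvInv start dct dist) (x : Int) :
    dct.contains x = dist.contains x := by
  rw [PySem.Dict.contains_eq_decide_mem_keys, PySem.Dict.contains_eq_decide_mem_keys, inv.keys_eq]

theorem pv_seen_contains (dist : PySem.Dict Int Int) (x : Int) :
    PySem.Set.contains dist.keys x = dist.contains x := by
  rw [PySem.Dict.contains_eq_decide_mem_keys]
  simp

theorem pv_size_eq {start : Int} {dct : PySem.Dict Int (Option Int)}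
    {dist : PySem.Dict Int Int} (inv : pvInv start dct dist) : dct.size = dist.size := by
  have h := congrArg List.length inv.keys_eq
  simpa [PySem.Dict.keys, PySem.Dict.size] using h

-- A's backtracking loop prepends exactly (distance of n) nodes into moves.
theorem pv_backtrack_len {start : Int} {dct : PySem.Dict Int (Option Int)}
    {dist : PySem.Dict Int Int} (inv : pvInv start dct dist) :
    ∀ (k : Nat) (n : Int) (f : Nat) (moves : List Int),
      dist.get? n = some (k : Int) → k ≤ f →
      (pvA_backtrack start dct f n moves).length = moves.length + k := by
  intro k
  induction k with
  | zero =>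
    intro n f moves hget _
    have hn : n = start := (inv.vals n 0 hget).2.2.1 rfl
    subst hn
    cases f with
    | zero => simp [pvA_backtrack]
    | succ f => simp [pvA_backtrack]
  | succ k ih =>
    intro n f moves hget hle
    have hpos : (0 : Int) < ((k + 1 : Nat) : Int) := by positivity
    obtain ⟨p, hdct, hdistp⟩ := (inv.vals n _ hget).2.2.2 hpos
    have hns : n ≠ start := by
      intro h; rw [h, inv.start0] at hget
      have : (0 : Int) = ((k + 1 : Nat) : Int) := by injection hget
      omega
    obtain ⟨f', rfl⟩ : ∃ f', f = f' + 1 := ⟨f - 1, by omega⟩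
    have hdistp' : dist.get? p = some (k : Int) := by
      rw [hdistp]; congr 1; push_cast; ring
    have := ih p f' (PySem.List.insert moves 1 n) hdistp' (by omega)
    simp only [pvA_backtrack, if_neg hns, hdct, this, PySem.List.length_insert]
    omega

-- Enqueuing a fresh neighbour (A: parent pointer; ghost: distance+1) keeps the invariant.
theorem pvInv_insert {start : Int} {dct : PySem.Dict Int (Option Int)}
    {dist : PySem.Dict Int Int} (inv : pvInv start dct dist) (node nbr : Int)
    (hnode : dist.contains node = true) (hnbr : dist.contains nbr = false) :
    pvInv start (dct.insert nbr (some node)) (dist.insert nbr (dist.getD node 0 + 1)) := by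
  have hnbrA : dct.contains nbr = false := by rw [pv_contains_eq inv]; exact hnbr
  obtain ⟨dn, hdn⟩ : ∃ d, dist.get? node = some d := by
    have := PySem.Dict.contains_eq_isSome_get? dist node
    rw [hnode] at this
    exact Option.isSome_iff_exists.mp this.symm
  have hgetDnode : dist.getD node 0 = dn := by
    rw [PySem.Dict.getD_eq_get?_getD, hdn]; rfl
  obtain ⟨hdn0, hdnlt, -, -⟩ := inv.vals node dn hdn
  have hnodenbr : node ≠ nbr := by
    intro h; rw [← h, PySem.Dict.contains_eq_isSome_get?, hdn] at hnbr; simp at hnbr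
  have hstartnbr : start ≠ nbr := by
    intro h; rw [← h, PySem.Dict.contains_eq_isSome_get?, inv.start0] at hnbr; simp at hnbr
  have hkey : ∀ m dm, dist.get? m = some dm → m ≠ nbr := by
    intro m dm hm h; rw [← h, PySem.Dict.contains_eq_isSome_get?, hm] at hnbr; simp at hnbr
  have hsize : (dist.insert nbr (dist.getD node 0 + 1)).size = dist.size + 1 := by
    rw [PySem.Dict.size_insert, if_neg (by simp [hnbr])]
  refine ⟨?_, ?_, ?_, ?_⟩
  · rw [PySem.Dict.keys_insert_of_not_contains _ _ hnbrA,
        PySem.Dict.keys_insert_of_not_contains _ _ hnbr, inv.keys_eq]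
  · exact PySem.Dict.nodup_keys_insert _ _ _ inv.nodup
  · rw [PySem.Dict.get?_insert_of_ne _ _ hstartnbr]; exact inv.start0
  · intro m dm hm
    rw [PySem.Dict.get?_insert] at hm
    by_cases hmn : m = nbr
    · rw [if_pos hmn] at hm
      have hdm : dm = dn + 1 := by rw [hgetDnode] at hm; injection hm; omega
      subst hdm
      refine ⟨by omega, by rw [hsize]; push_cast; omega, by omega, ?_⟩
      intro _
      refine ⟨node, ?_, ?_⟩
      · rw [hmn, PySem.Dict.get?_insert_self]
      · rw [PySem.Dict.get?_insert_of_ne _ _ hnodenbr, hdn]; congr 1; ring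
    · rw [if_neg hmn] at hm
      obtain ⟨h0, hlt, hz, hp⟩ := inv.vals m dm hm
      refine ⟨h0, by rw [hsize]; push_cast; omega, hz, ?_⟩
      intro hdmpos
      obtain ⟨p, hpA, hpB⟩ := hp hdmpos
      refine ⟨p, ?_, ?_⟩
      · rw [PySem.Dict.get?_insert_of_ne _ _ hmn]; exact hpA
      · rw [PySem.Dict.get?_insert_of_ne _ _ (hkey p _ hpB)]; exact hpB

-- Full simulation invariant: ghost invariant plus the key-provenance bound that makes
-- the fuel potentials work (every key is start or a listed neighbour).
structure pvSim (start : Int) (currentNbrs : List (Int × List Int))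
    (dct : PySem.Dict Int (Option Int)) (dist : PySem.Dict Int Int) : Prop where
  inv : pvInv start dct dist
  keys_sub : ∀ x ∈ dist.keys, x = start ∨ x ∈ pvAllNbrs currentNbrs

theorem pv_size_le {start : Int} {currentNbrs : List (Int × List Int)}
    {dct : PySem.Dict Int (Option Int)} {dist : PySem.Dict Int Int}
    (sim : pvSim start currentNbrs dct dist) :
    (dist.size : Int) ≤ (pvNbrCount currentNbrs : Int) + 1 := by
  have hsub : dist.keys ⊆ start :: pvAllNbrs currentNbrs := by
    intro x hx
    rcases sim.keys_sub x hx with h | h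
    · exact h ▸ List.mem_cons_self
    · exact List.mem_cons_of_mem _ h
  have := (sim.inv.nodup.subperm hsub).length_le
  have hsz : dist.size = dist.keys.length := by simp [PySem.Dict.size, PySem.Dict.keys]
  rw [hsz]
  simp only [List.length_cons, pvNbrCount] at this ⊢
  omega

theorem pv_lookup_sub (currentNbrs : List (Int × List Int)) (node : Int) :
    ∀ x ∈ (List.lookup node currentNbrs).getD [], x ∈ pvAllNbrs currentNbrs := by
  induction currentNbrs with
  | nil => simp [List.lookup]
  | cons p rest ih =>
    intro x hx
    simp only [List.lookup] at hx
    cases h : node == p.1 with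
    | true =>
      rw [h] at hx
      simp only [Option.getD_some] at hx
      simp only [pvAllNbrs, List.flatMap_cons, List.mem_append]
      exact Or.inl hx
    | false =>
      rw [h] at hx
      simp only [pvAllNbrs, List.flatMap_cons, List.mem_append]
      exact Or.inr (ih x hx)

-- One neighbour scan: A's inner for-loop and B's inner for-loop either both return early
-- with the matching values, or both enqueue the same fresh nodes, with the ghost dict
-- extended at the new level dcur.
theorem pv_scan_sim (start : Int) (currentNbrs : List (Int × List Int))
    (rewards : List (Int × Int)) (targets : List Int) :
    ∀ (nbrs qs nxt : List Int) (node : Int) (dct : PySem.Dict Int (Option Int))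
      (dist : PySem.Dict Int Int) (dcur : Int),
      pvSim start currentNbrs dct dist →
      dist.get? node = some (dcur - 1) →
      (∀ x ∈ nbrs, x ∈ pvAllNbrs currentNbrs) →
      (pvA_scan start rewards targets node nbrs (node :: (qs ++ nxt)) dct = Sum.inl (targets, dcur) ∧
       pvB_scanNbrs rewards targets nbrs nxt dist.keys = none)
      ∨ (∃ app dct' dist',
          pvA_scan start rewards targets node nbrs (node :: (qs ++ nxt)) dct =
            Sum.inr (node :: (qs ++ (nxt ++ app)), dct') ∧
          pvB_scanNbrs rewards targets nbrs nxt dist.keys = some (nxt ++ app, dist'.keys) ∧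
          pvSim start currentNbrs dct' dist' ∧
          (∀ x v, dist.get? x = some v → dist'.get? x = some v) ∧
          (∀ x ∈ app, dist'.get? x = some dcur) ∧
          (dist'.size : Int) = dist.size + app.length) := by
  intro nbrs
  induction nbrs with
  | nil =>
    intro qs nxt node dct dist dcur sim hnode hsub
    right
    exact ⟨[], dct, dist, by simp [pvA_scan], by simp [pvB_scanNbrs], sim,
      fun x v h => h, by simp, by simp⟩
  | cons nbr rest ih =>
    intro qs nxt node dct dist dcur sim hnode hsub
    have hsub' : ∀ x ∈ rest, x ∈ pvAllNbrs currentNbrs := fun x hx => hsub x (by simp [hx])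
    have hcA := pv_contains_eq sim.inv nbr
    have hcB := pv_seen_contains dist nbr
    have hcm := PySem.Dict.contains_eq_decide_mem_keys dist nbr
    by_cases hnbr : dist.contains nbr = true
    · have hmem : nbr ∈ dist.keys := by rw [hcm] at hnbr; exact of_decide_eq_true hnbr
      have := ih qs nxt node dct dist dcur sim hnode hsub'
      simpa [pvA_scan, pvB_scanNbrs, hcA, hcB, hnbr, hmem] using this
    · have hnbrF : dist.contains nbr = false := by simpa using hnbr
      have hmemF : nbr ∉ dist.keys := by
        intro h; rw [hcm] at hnbrF; simp [h] at hnbrF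
      by_cases hm : nbr ∈ targets
      · -- early return: A computes the backtrack length, B signals; values match
        left
        have hfil : ¬ ((List.lookup nbr rewards).getD 0 ≠ 0 ∧ nbr ∉ targets) := by
          intro h; exact h.2 hm
        obtain ⟨hd0, hdlt, -, -⟩ := sim.inv.vals node _ hnode
        have hk : ((((dcur - 1).toNat) : Nat) : Int) = dcur - 1 := Int.toNat_of_nonneg hd0
        have hlen := pv_backtrack_len sim.inv (dcur - 1).toNat node dct.size [start, nbr]
          (by rw [hk]; exact hnode)
          (by have := pv_size_eq sim.inv; omega)
        refine ⟨?_, ?_⟩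
        · simp only [pvA_scan, hcA, hnbrF, Bool.false_eq_true, if_false, if_neg hfil, if_pos hm]
          congr 1
          have h2 : ([start, nbr].length : Nat) = 2 := rfl
          rw [hlen, h2]
          push_cast
          rw [hk]
          ring_nf
        · simp only [pvB_scanNbrs, hcB, hnbrF, Bool.false_eq_true, if_false, if_pos hm]
      · by_cases hr : (List.lookup nbr rewards).getD 0 = 0
        · -- enqueue in both, extend the ghost dict at level dcur, continue
          have hfil : ¬ ((List.lookup nbr rewards).getD 0 ≠ 0 ∧ nbr ∉ targets) := by
            intro h; exact h.1 hr
          have hnodeC : dist.contains node = true := by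
            rw [PySem.Dict.contains_eq_isSome_get?, hnode]; rfl
          have hgetD : dist.getD node 0 = dcur - 1 := by
            rw [PySem.Dict.getD_eq_get?_getD, hnode]; rfl
          have hval : dist.getD node 0 + 1 = dcur := by rw [hgetD]; ring
          have inv' := pvInv_insert sim.inv node nbr hnodeC hnbrF
          rw [hval] at inv'
          have sim' : pvSim start currentNbrs (dct.insert nbr (some node)) (dist.insert nbr dcur) := by
            refine ⟨inv', ?_⟩
            intro x hx
            rw [PySem.Dict.keys_insert_of_not_contains _ _ hnbrF, List.mem_append] at hx
            rcases hx with hx | hx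
            · exact sim.keys_sub x hx
            · right
              have : x = nbr := by simpa using hx
              exact this ▸ hsub nbr (by simp)
          have hkeyed : ∀ x v, dist.get? x = some v → (dist.insert nbr dcur).get? x = some v := by
            intro x v hxv
            have hxne : x ≠ nbr := by
              intro h; rw [← h, PySem.Dict.contains_eq_isSome_get?, hxv] at hnbrF; simp at hnbrF
            rw [PySem.Dict.get?_insert_of_ne _ _ hxne]; exact hxv
          have hnode' : (dist.insert nbr dcur).get? node = some (dcur - 1) := hkeyed _ _ hnode
          have hres := ih qs (nxt ++ [nbr]) node (dct.insert nbr (some node))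
            (dist.insert nbr dcur) dcur sim' hnode' hsub'
          have hkeys' : (dist.insert nbr dcur).keys = dist.keys ++ [nbr] := by
            rw [PySem.Dict.keys_insert_of_not_contains _ _ hnbrF]
          have hsize' : ((dist.insert nbr dcur).size : Int) = dist.size + 1 := by
            rw [PySem.Dict.size_insert, if_neg (by simp [hnbrF])]; push_cast; ring
          have hstepA : pvA_scan start rewards targets node (nbr :: rest) (node :: (qs ++ nxt)) dct =
              pvA_scan start rewards targets node rest (node :: (qs ++ (nxt ++ [nbr]))) (dct.insert nbr (some node)) := by
            simp only [pvA_scan, hcA, hnbrF, Bool.false_eq_true, if_false, if_neg hfil, if_neg hm]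
            congr 1
            simp
          have hstepB : pvB_scanNbrs rewards targets (nbr :: rest) nxt dist.keys =
              pvB_scanNbrs rewards targets rest (nxt ++ [nbr]) (dist.insert nbr dcur).keys := by
            have haddkeys : PySem.Set.add dist.keys nbr = (dist.insert nbr dcur).keys := by
              rw [hkeys', PySem.Set.add]
              rw [show PySem.Set.contains dist.keys nbr = false from by rw [pv_seen_contains]; exact hnbrF]
              simp
            simp only [pvB_scanNbrs, hcB, hnbrF, Bool.false_eq_true, if_false, if_neg hm, if_pos hr,
              haddkeys]
          rcases hres with ⟨hA, hB⟩ | ⟨app, dct', dist', hA, hB, sim'', hmono, happ, hsz⟩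
          · left
            exact ⟨by rw [hstepA]; exact hA, by rw [hstepB]; exact hB⟩
          · right
            refine ⟨nbr :: app, dct', dist', ?_, ?_, sim'', ?_, ?_, ?_⟩
            · rw [hstepA, hA]; simp
            · rw [hstepB, hB]; simp
            · intro x v hxv
              exact hmono x v (hkeyed x v hxv)
            · intro x hx
              rcases List.mem_cons.mp hx with rfl | hx'
              · exact hmono x dcur (PySem.Dict.get?_insert_self _ _ _)
              · exact happ x hx'
            · rw [hsz, hsize']; simp only [List.length_cons]; push_cast; ring
        · -- filtered out in both
          have hfil : (List.lookup nbr rewards).getD 0 ≠ 0 ∧ nbr ∉ targets := ⟨hr, hm⟩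
          have := ih qs nxt node dct dist dcur sim hnode hsub'
          simpa [pvA_scan, pvB_scanNbrs, hcA, hcB, hnbrF, hmemF, hfil, hm, hr] using this

-- One queue step of A against one frontier-node step of B, assuming the master
-- simulation for A-fuel f (passed in as IH).
theorem pv_step_sim (start : Int) (currentNbrs : List (Int × List Int))
    (rewards : List (Int × Int)) (targets : List Int) (f : Nat)
    (IH : ∀ (fB : Nat) (rem nxt : List Int) (dct : PySem.Dict Int (Option Int))
      (dist : PySem.Dict Int Int) (dcur : Int),
      pvSim start currentNbrs dct dist →
      (∀ x ∈ rem, dist.get? x = some (dcur - 1)) →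
      (∀ x ∈ nxt, dist.get? x = some dcur) →
      ((rem.length : Int) + nxt.length + ((pvNbrCount currentNbrs : Int) + 1 - dist.size) ≤ f) →
      (((pvNbrCount currentNbrs : Int) + 1 - dist.size) + nxt.length + 1 ≤ fB) →
      pvA_bfs start currentNbrs rewards targets f (rem ++ nxt) dct =
        Option.map (fun dd => (targets, dd))
          (match pvB_level currentNbrs rewards targets rem nxt dist.keys with
           | none => some dcur
           | some (nxt', seen') => pvB_bfs currentNbrs rewards targets fB nxt' seen' dcur)) :
    ∀ (fB : Nat) (node : Int) (rem' nxt : List Int) (dct : PySem.Dict Int (Option Int))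
      (dist : PySem.Dict Int Int) (dcur : Int),
      pvSim start currentNbrs dct dist →
      dist.get? node = some (dcur - 1) →
      (∀ x ∈ rem', dist.get? x = some (dcur - 1)) →
      (∀ x ∈ nxt, dist.get? x = some dcur) →
      ((rem'.length : Int) + 1 + nxt.length + ((pvNbrCount currentNbrs : Int) + 1 - dist.size) ≤ (f : Int) + 1) →
      (((pvNbrCount currentNbrs : Int) + 1 - dist.size) + nxt.length + 1 ≤ fB) →
      pvA_bfs start currentNbrs rewards targets (f + 1) (node :: (rem' ++ nxt)) dct =
        Option.map (fun dd => (targets, dd))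
          (match (match pvB_scanNbrs rewards targets ((List.lookup node currentNbrs).getD []) nxt dist.keys with
                  | none => none
                  | some (nxt', seen') => pvB_level currentNbrs rewards targets rem' nxt' seen') with
           | none => some dcur
           | some (nxt', seen') => pvB_bfs currentNbrs rewards targets fB nxt' seen' dcur) := by
  intro fB node rem' nxt dct dist dcur sim hnode hrem hnxt hfA hfB
  rw [show pvA_bfs start currentNbrs rewards targets (f + 1) (node :: (rem' ++ nxt)) dct =
      (match pvA_scan start rewards targets node ((List.lookup node currentNbrs).getD [])
          (node :: (rem' ++ nxt)) dct with
       | Sum.inl res => some res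
       | Sum.inr (parseMe', dct') =>
         pvA_bfs start currentNbrs rewards targets f
           ((PySem.List.remove? parseMe' node).getD parseMe') dct') from by
    simp [pvA_bfs]]
  have hscan := pv_scan_sim start currentNbrs rewards targets
    ((List.lookup node currentNbrs).getD []) rem' nxt node dct dist dcur sim hnode
    (pv_lookup_sub currentNbrs node)
  rcases hscan with ⟨hA, hB⟩ | ⟨app, dct', dist', hA, hB, sim', hmono, happ, hsz⟩
  · rw [hA, hB]
    rfl
  · rw [hA, hB]
    simp only [PySem.List.remove?_cons_self, Option.getD_some]
    exact IH fB rem' (nxt ++ app) dct' dist' dcur sim'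
      (fun x hx => hmono x _ (hrem x hx))
      (fun x hx => by
        rcases List.mem_append.mp hx with hx' | hx'
        · exact hmono x _ (hnxt x hx')
        · exact happ x hx')
      (by simp only [List.length_append] at *; push_cast at *; omega)
      (by simp only [List.length_append] at *; push_cast at *; omega)

-- The master simulation: A's per-node queue machine against B's per-level machine,
-- with fuel potentials showing neither generous fuel ever runs out.
theorem pv_bfs_sim (start : Int) (currentNbrs : List (Int × List Int))
    (rewards : List (Int × Int)) (targets : List Int) :
    ∀ (fA fB : Nat) (rem nxt : List Int) (dct : PySem.Dict Int (Option Int))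
      (dist : PySem.Dict Int Int) (dcur : Int),
      pvSim start currentNbrs dct dist →
      (∀ x ∈ rem, dist.get? x = some (dcur - 1)) →
      (∀ x ∈ nxt, dist.get? x = some dcur) →
      ((rem.length : Int) + nxt.length + ((pvNbrCount currentNbrs : Int) + 1 - dist.size) ≤ fA) →
      (((pvNbrCount currentNbrs : Int) + 1 - dist.size) + nxt.length + 1 ≤ fB) →
      pvA_bfs start currentNbrs rewards targets fA (rem ++ nxt) dct =
        Option.map (fun dd => (targets, dd))
          (match pvB_level currentNbrs rewards targets rem nxt dist.keys with
           | none => some dcur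
           | some (nxt', seen') => pvB_bfs currentNbrs rewards targets fB nxt' seen' dcur) := by
  intro fA
  induction fA with
  | zero =>
    intro fB rem nxt dct dist dcur sim hrem hnxt hfA hfB
    have hK := pv_size_le sim
    have hrem0 : rem = [] := by
      cases rem with
      | nil => rfl
      | cons a l => exfalso; simp only [List.length_cons] at hfA; push_cast at hfA; omega
    have hnxt0 : nxt = [] := by
      cases nxt with
      | nil => rfl
      | cons a l => exfalso; simp only [List.length_cons] at hfA; push_cast at hfA; omega
    subst hrem0; subst hnxt0
    show (none : Option (List Int × Int)) = _
    simp only [pvB_level]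
    cases fB <;> rfl
  | succ f ih =>
    intro fB rem nxt dct dist dcur sim hrem hnxt hfA hfB
    have hK := pv_size_le sim
    cases rem with
    | cons node rem' =>
      have h := pv_step_sim start currentNbrs rewards targets f ih fB node rem' nxt dct dist dcur
        sim (hrem node (by simp)) (fun x hx => hrem x (by simp [hx])) hnxt
        (by simp only [List.length_cons] at hfA; push_cast at hfA ⊢; omega) hfB
      rw [show (node :: rem') ++ nxt = node :: (rem' ++ nxt) from rfl, h]
      rfl
    | nil =>
      cases nxt with
      | nil =>
        show pvA_bfs start currentNbrs rewards targets (f + 1) [] dct = _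
        rw [show pvA_bfs start currentNbrs rewards targets (f + 1) [] dct = none from by
          simp [pvA_bfs, PySem.List.pyGet?]]
        simp only [pvB_level]
        cases fB <;> rfl
      | cons m nxt'' =>
        obtain ⟨g, rfl⟩ : ∃ g, fB = g + 1 := ⟨fB - 1, by omega⟩
        have hd : ∀ x ∈ m :: nxt'', dist.get? x = some (dcur + 1 - 1) := by
          intro x hx
          rw [show dcur + 1 - 1 = dcur from by ring]
          exact hnxt x hx
        have h := pv_step_sim start currentNbrs rewards targets f ih g m nxt'' [] dct dist (dcur + 1)
          sim (hd m (by simp)) (fun x hx => hd x (by simp [hx])) (by simp)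
          (by simp only [List.length_cons, List.length_nil] at hfA ⊢; push_cast at hfA ⊢; omega)
          (by simp only [List.length_cons, List.length_nil] at hfB ⊢; push_cast at hfB ⊢; omega)
        rw [show ([] : List Int) ++ (m :: nxt'') = m :: (nxt'' ++ []) from by simp, h]
        simp only [pvB_level, pvB_bfs]

-- The invariant holds for the fresh per-round dictionaries {start: None} / ghost {start: 0}.
theorem pvInv_init (start : Int) :
    pvInv start (PySem.Dict.empty.insert start none) (PySem.Dict.empty.insert start 0) := by
  refine ⟨?_, ?_, ?_, ?_⟩
  · rw [PySem.Dict.keys_insert_of_not_contains _ _ (by simp [PySem.Dict.contains_empty]),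
        PySem.Dict.keys_insert_of_not_contains _ _ (by simp [PySem.Dict.contains_empty])]
    rfl
  · rw [PySem.Dict.keys_insert_of_not_contains _ _ (by simp [PySem.Dict.contains_empty])]
    simp [PySem.Dict.keys_empty]
  · exact PySem.Dict.get?_insert_self _ _ _
  · intro n d hn
    rw [PySem.Dict.get?_insert] at hn
    by_cases h : n = start
    · rw [if_pos h] at hn
      have hd : d = 0 := by injection hn with h'; omega
      subst hd
      refine ⟨le_refl 0, ?_, fun _ => h, by omega⟩
      rw [PySem.Dict.size_insert, if_neg (by simp [PySem.Dict.contains_empty])]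
      simp [PySem.Dict.size_empty]
    · rw [if_neg h, PySem.Dict.get?_empty] at hn
      exact absurd hn (by simp)

-- One whole BFS round: A's fueled queue BFS equals B's fueled level BFS.
theorem pv_round_eq (start : Int) (currentNbrs : List (Int × List Int))
    (rewards : List (Int × Int)) (targets : List Int) :
    pvA_bfs start currentNbrs rewards targets (pvNbrCount currentNbrs + 2)
        [start] (PySem.Dict.empty.insert start none) =
      Option.map (fun dd => (targets, dd))
        (pvB_bfs currentNbrs rewards targets (pvNbrCount currentNbrs + 2)
          [start] (PySem.Set.ofList [start]) 0) := by
  have hkeys0 : (PySem.Dict.empty.insert start (0 : Int)).keys = [start] := by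
    rw [PySem.Dict.keys_insert_of_not_contains _ _ (by simp [PySem.Dict.contains_empty])]
    simp [PySem.Dict.keys_empty]
  have hsz0 : (PySem.Dict.empty.insert start (0 : Int)).size = 1 := by
    rw [PySem.Dict.size_insert, if_neg (by simp [PySem.Dict.contains_empty])]
    simp [PySem.Dict.size_empty]
  have sim0 : pvSim start currentNbrs (PySem.Dict.empty.insert start none)
      (PySem.Dict.empty.insert start 0) := by
    refine ⟨pvInv_init start, ?_⟩
    intro x hx
    rw [hkeys0] at hx
    left
    simpa using hx
  have hmain := pv_bfs_sim start currentNbrs rewards targets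
    (pvNbrCount currentNbrs + 2) (pvNbrCount currentNbrs + 1) [start] []
    (PySem.Dict.empty.insert start none) (PySem.Dict.empty.insert start 0) 1 sim0
    (by
      intro x hx
      have hx' : x = start := by simpa using hx
      subst hx'
      rw [show (1 : Int) - 1 = 0 from by ring]
      exact PySem.Dict.get?_insert_self _ _ _)
    (by simp)
    (by rw [hsz0]; simp only [List.length_cons, List.length_nil]; push_cast; omega)
    (by rw [hsz0]; simp only [List.length_nil]; push_cast; omega)
  rw [show [start] ++ ([] : List Int) = [start] from rfl] at hmain
  rw [hmain]
  have hseen0 : PySem.Set.ofList [start] = (PySem.Dict.empty.insert start (0 : Int)).keys := by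
    rw [hkeys0]
    rfl
  rw [show pvB_bfs currentNbrs rewards targets (pvNbrCount currentNbrs + 2) [start]
      (PySem.Set.ofList [start]) 0 =
      (match pvB_level currentNbrs rewards targets [start] [] (PySem.Set.ofList [start]) with
       | none => some 1
       | some (nxt, seen') => pvB_bfs currentNbrs rewards targets (pvNbrCount currentNbrs + 1) nxt seen' 1) from by
    show pvB_bfs currentNbrs rewards targets (pvNbrCount currentNbrs + 1 + 1) [start]
      (PySem.Set.ofList [start]) 0 = _
    simp only [pvB_bfs, zero_add]]
  rw [hseen0]

-- A's fueled while-idx loop equals B's recursion on range(idx, len(maxReward)).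
theorem pv_outer_eq (start : Int) (currentNbrs : List (Int × List Int))
    (maxReward : List (List Int)) (rewards : List (Int × Int)) :
    ∀ (f : Nat) (idx : Int), (maxReward.length : Int) - idx ≤ (f : Int) →
      pvA_outer start currentNbrs maxReward rewards f idx =
      pvB_outer start currentNbrs maxReward rewards (PySem.List.pyRange idx (maxReward.length : Int) 1) := by
  intro f
  induction f with
  | zero =>
    intro idx hf
    rw [PySem.List.pyRange_one_eq_nil (by omega)]
    rfl
  | succ f ih =>
    intro idx hf
    by_cases hlt : idx < (maxReward.length : Int)
    · rw [PySem.List.pyRange_one_cons hlt]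
      show (if idx < (maxReward.length : Int) then _ else _) = _
      rw [if_pos hlt]
      simp only [pvB_outer]
      cases hmr : PySem.List.pyGet? maxReward idx with
      | none => rfl
      | some targets =>
        dsimp only
        rw [pv_round_eq start currentNbrs rewards targets]
        cases hbfs : pvB_bfs currentNbrs rewards targets (pvNbrCount currentNbrs + 2)
            [start] (PySem.Set.ofList [start]) 0 with
        | some d => rfl
        | none => exact ih (idx + 1) (by omega)
    · rw [PySem.List.pyRange_one_eq_nil (by omega)]
      show (if idx < (maxReward.length : Int) then _ else _) = _
      rw [if_neg hlt]
      rfl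

-- ===== VERDICT (by name: the statement is the Claim_ definition above) =====
theorem g0shortestPath_spec : Claim_equal_g0shortestPath := by
  intro start currentNbrs maxReward rewards idx _ hPre
  unfold Spec_g0shortestPath g0shortestPath g0shortestPath_alt
  rw [PySem.List.len_eq]
  exact pv_outer_eq start currentNbrs maxReward rewards (2 * maxReward.length + 1) idx
    (by obtain ⟨h1, -⟩ := hPre; push_cast; omega)
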